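-- pv_equiv track=rewrite | github.com/DanaSwitch/leetcode | HWod/Simulation/magic_block.py | shared_steps
-- ===== SOURCE A (Python) =====
-- def shared_steps(a, b):
--     """
--     计算相邻两堆可以共享的魔法次数
--     思路: 让较大的数不断除以2, 直到两数相遇
--     相遇之后到0的步数, 就是可以一起施魔法的次数
--     """
--     if a == 0 or b == 0:
--         return 0
--
--     # 不断让较大的数减半，直到两数相等
--     while a != b:
--         if a > b:
--             a //= 2
--         else:
--             b //= 2
--
--     # 此时 a == b，从这里到0还需要几步
--     count = 0
--     while a > 0:
--         a //= 2
--         count += 1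
--     return count
-- ===== SOURCE B (Python) =====
-- def shared_steps(a, b):
--     """Closed form: the answer is the number of shared leading binary bits
--     of a and b (after the zero guard), computed with bit_length/xor instead
--     of the two halving loops."""
--     if a == 0 or b == 0:
--         return 0
--     la, lb = a.bit_length(), b.bit_length()
--     if la > lb:
--         a >>= la - lb
--     else:
--         b >>= lb - la
--     return min(la, lb) - (a ^ b).bit_length()
-- ===== Notes on version B (the rewrite author's own statement) =====
-- stated objective: faster
-- what changed: Replaces A's two value-halving loops (halve the larger until the piles meet, then count halvings to zero) by a single closed-form bit computation: align the operands by bit length and return min(bit lengths) minus the bit length of their xor.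
-- outside the precondition, e.g. on shared_steps(-3, -3): A returns 0, B returns 2; on shared_steps(-5, 3): A does not finish within the time limit, B returns 0
import Mathlib
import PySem

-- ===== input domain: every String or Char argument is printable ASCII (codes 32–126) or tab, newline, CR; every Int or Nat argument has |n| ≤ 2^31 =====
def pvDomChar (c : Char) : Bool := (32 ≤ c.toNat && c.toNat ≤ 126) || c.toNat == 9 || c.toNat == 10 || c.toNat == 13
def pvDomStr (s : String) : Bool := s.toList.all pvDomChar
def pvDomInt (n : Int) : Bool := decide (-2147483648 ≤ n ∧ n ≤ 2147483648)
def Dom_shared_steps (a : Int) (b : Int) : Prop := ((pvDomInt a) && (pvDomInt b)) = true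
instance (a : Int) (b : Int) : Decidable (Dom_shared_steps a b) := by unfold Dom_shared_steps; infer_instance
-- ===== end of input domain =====

-- B replaces A's two halving loops by one closed-form bit computation (O(1) word operations
-- instead of A's per-bit loop iterations); equivalence is claimed on Pre_ below.

-- ===== PORT A =====
-- A's first while-loop ('while a != b: halve the larger'); ported with fuel, which only makes the
-- recursion total: inside Pre_ ∩ Dom the loop needs at most bitLength a + bitLength b ≤ 66 ≤ 200 steps.
def pvMeet : Nat → Int → Int → Int
  | 0, a, _ => a
  | fuel+1, a, b =>
    if a ≠ b then
      (if a > b then pvMeet fuel (PySem.Int.floordiv a 2) b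
       else pvMeet fuel a (PySem.Int.floordiv b 2))
    else a

-- A's second while-loop ('while a > 0: a //= 2; count += 1'); terminates for every Int.
def pvCount (a : Int) (count : Int) : Int :=
  if h : 0 < a then pvCount (PySem.Int.floordiv a 2) (count + 1) else count
termination_by a.toNat
decreasing_by
  rw [PySem.Int.floordiv_eq_ediv_of_pos (by omega : (0:Int) < 2)]
  omega

def shared_steps (a : Int) (b : Int) : Int :=
  if a = 0 ∨ b = 0 then 0
  else pvCount (pvMeet 200 a b) 0

-- ===== PORT B =====
-- Transliteration of Source B. bit_length → PySem.Int.bitLength; '>>' with a Nat amount (the amounts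
-- la-lb / lb-la are ≥ 0 by the branch condition, so Nat subtraction is exact here); '^' → PySem.Int.bxor.
def shared_steps_alt (a : Int) (b : Int) : Int :=
  if a = 0 ∨ b = 0 then 0
  else
    let la := PySem.Int.bitLength a
    let lb := PySem.Int.bitLength b
    let a' := if la > lb then a >>> (la - lb) else a
    let b' := if la > lb then b else b >>> (lb - la)
    ((min la lb : Nat) : Int) - ((PySem.Int.bitLength (PySem.Int.bxor a' b') : Nat) : Int)

-- ===== PRECONDITION & SPEC =====
-- Pre_ excludes pairs of negative numbers: there A loops forever, except on the accidental
-- a == b (or zero-argument) corners where its 0 is an artefact of the halving loop (e.g. (-3,-3):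
-- A returns 0, B returns 2, the shared-bit count of the absolute values).
def Pre_shared_steps (a : Int) (b : Int) : Prop := a = 0 ∨ b = 0 ∨ (0 < a ∧ 0 < b)
instance (a : Int) (b : Int) : Decidable (Pre_shared_steps a b) := by unfold Pre_shared_steps; infer_instance
def pvWitness_shared_steps : Int × Int := (5, 3)

def Spec_shared_steps (a : Int) (b : Int) (out : Int) : Prop := out = shared_steps_alt a b
instance (a : Int) (b : Int) (out : Int) : Decidable (Spec_shared_steps a b out) := by unfold Spec_shared_steps; infer_instance

-- ===== CLAIM (what is proved, stated in full; the proofs are below) =====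
def Claim_equal_shared_steps : Prop := ∀ (a : Int) (b : Int), Dom_shared_steps a b → Pre_shared_steps a b → Spec_shared_steps a b (shared_steps a b)

-- ===== LEMMAS AND PROOFS =====

theorem bitLength_pos {a : Int} (h : 0 < a) : 0 < PySem.Int.bitLength a := by
  rw [PySem.Int.bitLength_of_pos h]; omega

-- monotonicity of bitLength on positive ints
theorem bitLength_mono {a b : Int} (ha : 0 < a) (hab : a ≤ b) :
    PySem.Int.bitLength a ≤ PySem.Int.bitLength b := by
  by_contra hlt
  push Not at hlt
  have h1 := PySem.Int.lt_two_pow_bitLength b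
  have h2 := PySem.Int.two_pow_bitLength_le a (by omega)
  have h3 : 2 ^ PySem.Int.bitLength b ≤ 2 ^ (PySem.Int.bitLength a - 1) :=
    Nat.pow_le_pow_right (by omega) (by omega)
  have h4 : b.natAbs < a.natAbs := by omega
  omega

theorem bitLength_le_32 {a : Int} (h : a.natAbs ≤ 2 ^ 31) : PySem.Int.bitLength a ≤ 32 := by
  by_contra hlt
  push Not at hlt
  have h2 := PySem.Int.two_pow_bitLength_le a (by intro h0; simp [h0] at hlt)
  have h3 : 2 ^ 32 ≤ 2 ^ (PySem.Int.bitLength a - 1) :=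
    Nat.pow_le_pow_right (by omega) (by omega)
  have : (2:Nat) ^ 31 < 2 ^ 32 := by norm_num
  omega

theorem pvCount_eq {a : Int} (h : 0 ≤ a) :
    ∀ c : Int, pvCount a c = c + (PySem.Int.bitLength a : Int) := by
  by_cases hp : 0 < a
  · have ha2 : (0:Int) ≤ PySem.Int.floordiv a 2 := by
      rw [PySem.Int.floordiv_eq_ediv_of_pos (by omega : (0:Int) < 2)]; omega
    intro c
    rw [pvCount]
    simp only [hp, dif_pos]
    rw [pvCount_eq ha2 (c + 1), PySem.Int.bitLength_of_pos hp]
    push_cast; ring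
  · intro c
    have ha0 : a = 0 := by omega
    rw [pvCount]
    simp [ha0, PySem.Int.bitLength_zero]
termination_by a.toNat
decreasing_by
  rw [PySem.Int.floordiv_eq_ediv_of_pos (by omega : (0:Int) < 2)]
  omega

-- the closed form on positive arguments, written out
theorem alt_pos {a b : Int} (ha : 0 < a) (hb : 0 < b) :
    shared_steps_alt a b =
      ((min (PySem.Int.bitLength a) (PySem.Int.bitLength b) : Nat) : Int) -
        ((PySem.Int.bitLength (PySem.Int.bxor
            (if PySem.Int.bitLength a > PySem.Int.bitLength b
             then a >>> (PySem.Int.bitLength a - PySem.Int.bitLength b) else a)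
            (if PySem.Int.bitLength a > PySem.Int.bitLength b
             then b else b >>> (PySem.Int.bitLength b - PySem.Int.bitLength a))) : Nat) : Int) := by
  have : ¬ (a = 0 ∨ b = 0) := by omega
  simp only [shared_steps_alt, this, if_false]

theorem natCast_shiftRight (m k : Nat) : ((m : Int) >>> k) = ((m >>> k : Nat) : Int) := rfl

theorem shiftRight_succ_floordiv (a : Int) (ha : 0 ≤ a) (k : Nat) :
    a >>> (k + 1) = (PySem.Int.floordiv a 2) >>> k := by
  obtain ⟨m, rfl⟩ := Int.eq_ofNat_of_zero_le ha
  rw [show PySem.Int.floordiv (m : Int) 2 = ((m / 2 : Nat) : Int) from by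
        exact_mod_cast PySem.Int.floordiv_natCast m 2]
  rw [natCast_shiftRight, natCast_shiftRight]
  congr 1
  rw [show k + 1 = 1 + k from Nat.add_comm k 1, Nat.shiftRight_add m 1 k, Nat.shiftRight_one]

-- halving both operands halves the xor (on nonnegative ints)
theorem bxor_half (a b : Int) (ha : 0 ≤ a) (hb : 0 ≤ b) :
    PySem.Int.bxor (PySem.Int.floordiv a 2) (PySem.Int.floordiv b 2) =
      PySem.Int.floordiv (PySem.Int.bxor a b) 2 := by
  obtain ⟨m, rfl⟩ := Int.eq_ofNat_of_zero_le ha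
  obtain ⟨n, rfl⟩ := Int.eq_ofNat_of_zero_le hb
  rw [show PySem.Int.floordiv (m : Int) 2 = ((m / 2 : Nat) : Int) from by
        exact_mod_cast PySem.Int.floordiv_natCast m 2,
      show PySem.Int.floordiv (n : Int) 2 = ((n / 2 : Nat) : Int) from by
        exact_mod_cast PySem.Int.floordiv_natCast n 2,
      PySem.Int.bxor_natCast, PySem.Int.bxor_natCast,
      show PySem.Int.floordiv ((m ^^^ n : Nat) : Int) 2 = (((m ^^^ n) / 2 : Nat) : Int) from by
        exact_mod_cast PySem.Int.floordiv_natCast (m ^^^ n) 2]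
  congr 1
  rw [← Nat.shiftRight_one, ← Nat.shiftRight_one, ← Nat.shiftRight_one,
      Nat.shiftRight_xor_distrib]

theorem bxor_nonneg (a b : Int) (ha : 0 ≤ a) (hb : 0 ≤ b) : 0 ≤ PySem.Int.bxor a b := by
  obtain ⟨m, rfl⟩ := Int.eq_ofNat_of_zero_le ha
  obtain ⟨n, rfl⟩ := Int.eq_ofNat_of_zero_le hb
  rw [PySem.Int.bxor_natCast]; positivity

theorem bxor_eq_zero_iff (a b : Int) (ha : 0 ≤ a) (hb : 0 ≤ b) :
    PySem.Int.bxor a b = 0 ↔ a = b := by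
  obtain ⟨m, rfl⟩ := Int.eq_ofNat_of_zero_le ha
  obtain ⟨n, rfl⟩ := Int.eq_ofNat_of_zero_le hb
  rw [PySem.Int.bxor_natCast]
  constructor
  · intro h
    have : m ^^^ n = 0 := by exact_mod_cast h
    exact congrArg _ (Nat.xor_eq_zero_iff.mp this)
  · intro h
    have : m = n := by exact_mod_cast h
    simp [this]

-- KEY STEP LEMMA: halving the strictly larger operand does not change the closed form
theorem alt_step {a b : Int} (hb : 0 < b) (hab : b < a) :
    shared_steps_alt (PySem.Int.floordiv a 2) b = shared_steps_alt a b := by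
  have ha : 0 < a := by omega
  have ha2 : 0 < PySem.Int.floordiv a 2 := by
    rw [PySem.Int.floordiv_eq_ediv_of_pos (by omega : (0:Int) < 2)]; omega
  have hlab : PySem.Int.bitLength b ≤ PySem.Int.bitLength a := bitLength_mono hb (by omega)
  have hbl : PySem.Int.bitLength a = PySem.Int.bitLength (PySem.Int.floordiv a 2) + 1 :=
    PySem.Int.bitLength_of_pos ha
  rw [alt_pos ha2 hb, alt_pos ha hb]
  rcases Nat.lt_or_ge (PySem.Int.bitLength b) (PySem.Int.bitLength a) with hgt | hge
  · rcases Nat.lt_or_ge (PySem.Int.bitLength b)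
        (PySem.Int.bitLength (PySem.Int.floordiv a 2)) with hgt2 | hge2
    · -- a/2 still has strictly more bits than b: shifted operands coincide
      rw [if_pos hgt2, if_pos hgt2, if_pos hgt, if_pos hgt]
      have e1 : (PySem.Int.floordiv a 2) >>>
            (PySem.Int.bitLength (PySem.Int.floordiv a 2) - PySem.Int.bitLength b)
          = a >>> (PySem.Int.bitLength a - PySem.Int.bitLength b) := by
        rw [show PySem.Int.bitLength a - PySem.Int.bitLength b
              = (PySem.Int.bitLength (PySem.Int.floordiv a 2) - PySem.Int.bitLength b) + 1
            by omega,
            shiftRight_succ_floordiv a (by omega)]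
      rw [e1]
      congr 2
      omega
    · -- after halving, the bit lengths are equal: shift amounts are 0 and 1
      have c1 : ¬ PySem.Int.bitLength (PySem.Int.floordiv a 2) > PySem.Int.bitLength b := by omega
      rw [if_neg c1, if_neg c1, if_pos hgt, if_pos hgt]
      rw [show PySem.Int.bitLength b - PySem.Int.bitLength (PySem.Int.floordiv a 2) = 0
            by omega, Int.shiftRight_zero]
      rw [show PySem.Int.bitLength a - PySem.Int.bitLength b = 0 + 1 by omega,
          shiftRight_succ_floordiv a (by omega), Int.shiftRight_zero]
      congr 2
      omega
  · -- equal bit lengths and a ≠ b: both operands lose their last bit, the xor loses one bit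
    have hle : PySem.Int.bitLength a = PySem.Int.bitLength b := by omega
    have hx0 : PySem.Int.bxor a b ≠ 0 := fun h =>
      absurd ((bxor_eq_zero_iff a b (by omega) (by omega)).mp h) (by omega)
    have hxpos : 0 < PySem.Int.bxor a b :=
      lt_of_le_of_ne (bxor_nonneg a b (by omega) (by omega)) (Ne.symm hx0)
    have c1 : ¬ PySem.Int.bitLength (PySem.Int.floordiv a 2) > PySem.Int.bitLength b := by omega
    rw [if_neg c1, if_neg c1,
        if_neg (show ¬ PySem.Int.bitLength a > PySem.Int.bitLength b by omega),
        if_neg (show ¬ PySem.Int.bitLength a > PySem.Int.bitLength b by omega)]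
    rw [show PySem.Int.bitLength b - PySem.Int.bitLength a = 0 by omega, Int.shiftRight_zero]
    rw [show PySem.Int.bitLength b - PySem.Int.bitLength (PySem.Int.floordiv a 2) = 0 + 1
          by omega,
        shiftRight_succ_floordiv b (by omega), Int.shiftRight_zero]
    rw [bxor_half a b (by omega) (by omega)]
    have e6 : PySem.Int.bitLength (PySem.Int.bxor a b) =
        PySem.Int.bitLength (PySem.Int.floordiv (PySem.Int.bxor a b) 2) + 1 :=
      PySem.Int.bitLength_of_pos hxpos
    rw [e6]
    have m1 : min (PySem.Int.bitLength (PySem.Int.floordiv a 2)) (PySem.Int.bitLength b)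
        = PySem.Int.bitLength (PySem.Int.floordiv a 2) := by omega
    have m2 : min (PySem.Int.bitLength a) (PySem.Int.bitLength b)
        = PySem.Int.bitLength a := by omega
    rw [m1, m2]
    push_cast
    omega

-- the closed form is symmetric
theorem alt_comm {a b : Int} (ha : 0 < a) (hb : 0 < b) :
    shared_steps_alt a b = shared_steps_alt b a := by
  rw [alt_pos ha hb, alt_pos hb ha]
  set la := PySem.Int.bitLength a
  set lb := PySem.Int.bitLength b
  rcases Nat.lt_trichotomy la lb with h | h | h
  · rw [if_neg (by omega : ¬ la > lb), if_neg (by omega : ¬ la > lb),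
        if_pos (by omega : lb > la), if_pos (by omega : lb > la),
        PySem.Int.bxor_comm, Nat.min_comm]
  · rw [if_neg (by omega : ¬ la > lb), if_neg (by omega : ¬ la > lb),
        if_neg (by omega : ¬ lb > la), if_neg (by omega : ¬ lb > la)]
    rw [show la - lb = 0 by omega, show lb - la = 0 by omega,
        Int.shiftRight_zero, Int.shiftRight_zero, PySem.Int.bxor_comm, Nat.min_comm]
  · rw [if_pos (by omega : la > lb), if_pos (by omega : la > lb),
        if_neg (by omega : ¬ lb > la), if_neg (by omega : ¬ lb > la),
        PySem.Int.bxor_comm, Nat.min_comm]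

-- the closed form on equal arguments is the bit length
theorem alt_self {a : Int} (ha : 0 < a) : shared_steps_alt a a = (PySem.Int.bitLength a : Int) := by
  rw [alt_pos ha ha]
  simp [PySem.Int.bxor_self, PySem.Int.bitLength_zero]

-- MAIN LOOP INVARIANT: with enough fuel, A's meet-then-count equals B's closed form
theorem meet_count (fuel : Nat) : ∀ a b : Int, 0 < a → 0 < b →
    PySem.Int.bitLength a + PySem.Int.bitLength b ≤ fuel →
    pvCount (pvMeet fuel a b) 0 = shared_steps_alt a b := by
  induction fuel with
  | zero =>
    intro a b ha hb hle
    have := bitLength_pos ha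
    omega
  | succ fuel ih =>
    intro a b ha hb hle
    rcases Int.lt_trichotomy a b with hab | hab | hab
    · -- b > a: halve b
      have hb2 : 0 < PySem.Int.floordiv b 2 := by
        rw [PySem.Int.floordiv_eq_ediv_of_pos (by omega : (0:Int) < 2)]; omega
      rw [pvMeet, if_pos (by omega : a ≠ b), if_neg (by omega : ¬ a > b)]
      rw [ih a (PySem.Int.floordiv b 2) ha hb2
            (by have := PySem.Int.bitLength_of_pos hb; omega)]
      rw [alt_comm ha hb2, alt_step ha hab, alt_comm hb ha]
    · -- a = b: loop exits; count the halvings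
      subst hab
      rw [pvMeet, if_neg (by omega : ¬ a ≠ a)]
      rw [pvCount_eq (by omega) 0, alt_self ha]
      omega
    · -- a > b: halve a
      have ha2 : 0 < PySem.Int.floordiv a 2 := by
        rw [PySem.Int.floordiv_eq_ediv_of_pos (by omega : (0:Int) < 2)]; omega
      rw [pvMeet, if_pos (by omega : a ≠ b), if_pos hab]
      rw [ih (PySem.Int.floordiv a 2) b ha2 hb
            (by have := PySem.Int.bitLength_of_pos ha; omega)]
      exact alt_step hb hab

-- ===== VERDICT (by name: the statement is the Claim_ definition above) =====
theorem shared_steps_spec : Claim_equal_shared_steps := by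
  intro a b hdom hpre
  unfold Spec_shared_steps shared_steps
  rcases hpre with h0 | h0 | ⟨ha, hb⟩
  · simp [shared_steps_alt, h0]
  · simp [shared_steps_alt, h0]
  · rw [if_neg (by omega : ¬ (a = 0 ∨ b = 0))]
    have hdom' : a.natAbs ≤ 2 ^ 31 ∧ b.natAbs ≤ 2 ^ 31 := by
      unfold Dom_shared_steps pvDomInt at hdom
      simp at hdom
      omega
    have hfa := bitLength_le_32 hdom'.1
    have hfb := bitLength_le_32 hdom'.2
    exact meet_count 200 a b ha hb (by omega)
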